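-- pv_equiv track=rewrite | github.com/JNemune/MineSweeperEngine | minesweeper1.2.3.1.py | identify100and0
-- ===== SOURCE A (Python) =====
-- def neighbor (x):
--     out = list ()
--     (line, column) = x
--     for neighbor_line in [-1, 0, 1]:
--         for neighbor_column in [-1, 0, 1]:
--             if 8 > line + neighbor_line >= 0 and 7 > column + neighbor_column >= 0 and (neighbor_line, neighbor_column) != (0, 0):
--                 out.append ((line + neighbor_line, column + neighbor_column))
--     return out
--
-- def identify100and0 (inp, item):
--     if not (inp [item] in ['.', '*', '0', '-']):
--         house_value = int (inp [item])
--         mine_possibility = list ()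
--         neighbors_list = neighbor (item)
--         for i in neighbors_list:
--             if inp [i] == '*':
--                 house_value -= 1
--             elif inp [i] == '-':
--                 mine_possibility.append (i)
--         if house_value == 0:
--             for i in neighbors_list:
--                 if inp [i] == '-':
--                     inp [i] = '.'
--                     for j in neighbor (i):
--                         if not (inp [j] in ['.', '*', '0', '-']) and item != j:
--                             inp = identify100and0 (inp, j)
--         elif len (mine_possibility) == house_value:
--             for i in neighbors_list:
--                 if inp [i] == '-':
--                     inp [i] = '*'
--                     neighbor2_list = neighbor (i)
--                     for j in neighbor2_list:
--                         if not (inp [j] in ['.', '*', '0', '-']) and i != j: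
--                             inp = identify100and0 (inp, j)
--     return inp
-- ===== SOURCE B (Python) =====
-- # B: iterative worklist version -- an explicit stack of continuation frames replaces
-- # A's recursion (same in-place mutation of the inp dict as A; same return value).
-- def neighbor (x):
--     out = list ()
--     (line, column) = x
--     for neighbor_line in [-1, 0, 1]:
--         for neighbor_column in [-1, 0, 1]:
--             if 8 > line + neighbor_line >= 0 and 7 > column + neighbor_column >= 0 and (neighbor_line, neighbor_column) != (0, 0):
--                 out.append ((line + neighbor_line, column + neighbor_column))
--     return out
--
-- STOP = ('.', '*', '0', '-')
--
-- def identify100and0 (inp, item):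
--     stack = [('eval', item)]
--     while stack:
--         frame = stack.pop()
--         kind = frame[0]
--         if kind == 'eval':
--             cell = frame[1]
--             v = inp[cell]
--             if v in STOP:
--                 continue
--             hv = int(v)
--             poss = 0
--             for n in neighbor(cell):
--                 w = inp[n]
--                 if w == '*':
--                     hv -= 1
--                 elif w == '-':
--                     poss += 1
--             if hv == 0:
--                 stack.append(('mark', '.', cell, neighbor(cell)))
--             elif poss == hv:
--                 stack.append(('mark', '*', cell, neighbor(cell)))
--         elif kind == 'mark':
--             _, mark, cell, rest = frame
--             if rest:
--                 i, rest = rest[0], rest[1:]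
--                 stack.append(('mark', mark, cell, rest))
--                 if inp[i] == '-':
--                     inp[i] = mark
--                     excl = cell if mark == '.' else i
--                     stack.append(('scan', excl, neighbor(i)))
--         else:  # 'scan'
--             _, excl, rest = frame
--             if rest:
--                 j, rest = rest[0], rest[1:]
--                 stack.append(('scan', excl, rest))
--                 if inp[j] not in STOP and excl != j:
--                     stack.append(('eval', j))
--     return inp
-- ===== Notes on version B (the rewrite author's own statement) =====
-- stated objective: alternative
-- what changed: A's self-recursion is replaced by an iterative engine driving an explicit stack of defunctionalized continuation frames (eval cell / mark-loop / neighbor-scan), processed in the same depth-first order. Pre_ excludes inputs that can make A raise (item missing or unparseable, a missing/ill-valued neighbor, or - when item's number forces a deduction - an incomplete/ill-valued 8x7 board, where Pre_'s full-board demand also excludes some incomplete boards on which A happens to return its input unchanged).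
import Mathlib
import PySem

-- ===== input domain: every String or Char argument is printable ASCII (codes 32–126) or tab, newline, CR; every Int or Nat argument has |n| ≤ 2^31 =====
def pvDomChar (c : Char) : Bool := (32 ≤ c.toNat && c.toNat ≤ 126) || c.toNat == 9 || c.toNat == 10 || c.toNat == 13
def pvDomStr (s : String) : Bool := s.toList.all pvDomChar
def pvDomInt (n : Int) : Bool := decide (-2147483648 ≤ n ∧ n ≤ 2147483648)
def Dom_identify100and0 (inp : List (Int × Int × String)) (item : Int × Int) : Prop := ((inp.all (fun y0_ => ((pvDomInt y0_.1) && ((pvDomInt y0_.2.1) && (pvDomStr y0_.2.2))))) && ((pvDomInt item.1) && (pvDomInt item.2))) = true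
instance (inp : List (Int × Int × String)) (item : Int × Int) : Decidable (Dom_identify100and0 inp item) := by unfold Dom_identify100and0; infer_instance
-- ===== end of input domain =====

-- B replaces A's self-recursion by an iterative engine over an explicit stack of
-- defunctionalized continuation frames, same depth-first order, same in-place dict
-- mutation as A (the equivalence proved is about the returned mapping).

-- ===== PORT A =====

-- marshalling of the Python dict argument (shared by both ports and Pre_)
def pvToDict (inp : List (Int × Int × String)) : PySem.Dict (Int × Int) String :=
  PySem.Dict.ofList (inp.map (fun t => ((t.1, t.2.1), t.2.2)))

def pvToTriples (d : PySem.Dict (Int × Int) String) : List (Int × Int × String) :=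
  d.items.map (fun p => (p.1.1, p.1.2, p.2))

def pvStop : List String := [".", "*", "0", "-"]

-- neighbor(x) of the Python module, transliterated
def nbr (x : Int × Int) : List (Int × Int) :=
  ([-1, 0, 1] : List Int).foldl (fun out nl =>
    ([-1, 0, 1] : List Int).foldl (fun out nc =>
      if x.1 + nl < 8 ∧ 0 ≤ x.1 + nl ∧ x.2 + nc < 7 ∧ 0 ≤ x.2 + nc ∧ (nl, nc) ≠ ((0 : Int), (0 : Int))
      then out ++ [(x.1 + nl, x.2 + nc)] else out) out) []

-- '-'-cell count of the board: A's recursion always recurses after turning a '-'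
-- into '.' or '*', so pvDash d + 1 is a sufficient recursion-depth fuel
def pvDash (d : PySem.Dict (Int × Int) String) : Nat :=
  d.items.countP (fun p => p.2 == "-")

-- recursive body of A (getD default "" is only reached where Python raises KeyError,
-- excluded by Pre_; ofStr? none is Python's ValueError, likewise excluded)
def goA : Nat → PySem.Dict (Int × Int) String → Int × Int → PySem.Dict (Int × Int) String
  | 0, d, _ => d
  | f + 1, d, item =>
    let v := d.getD item ""
    if v ∈ pvStop then d
    else
      match PySem.Int.ofStr? v with
      | none => d
      | some hv0 =>
        let ns := nbr item
        let hp := ns.foldl (fun (acc : Int × List (Int × Int)) i =>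
            if d.getD i "" = "*" then (acc.1 - 1, acc.2)
            else if d.getD i "" = "-" then (acc.1, acc.2 ++ [i]) else acc) (hv0, [])
        if hp.1 = 0 then
          ns.foldl (fun dd i =>
            if dd.getD i "" = "-" then
              (nbr i).foldl (fun dd j =>
                if ¬ (dd.getD j "" ∈ pvStop) ∧ item ≠ j then goA f dd j else dd)
                (dd.insert i ".")
            else dd) d
        else if ((hp.2.length : Int) = hp.1) then
          ns.foldl (fun dd i =>
            if dd.getD i "" = "-" then
              (nbr i).foldl (fun dd j =>
                if ¬ (dd.getD j "" ∈ pvStop) ∧ i ≠ j then goA f dd j else dd)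
                (dd.insert i "*")
            else dd) d
        else d

def identify100and0 (inp : List (Int × Int × String)) (item : Int × Int) : List (Int × Int × String) :=
  let d := pvToDict inp
  pvToTriples (goA (pvDash d + 1) d item)

-- ===== PORT B =====

-- defunctionalized continuation frames of Source B's worklist
inductive PvFrame
  | eval (cell : Int × Int)
  | mark (m : String) (cell : Int × Int) (rest : List (Int × Int))
  | scan (excl : Int × Int) (rest : List (Int × Int))
deriving DecidableEq, Repr

-- step bound for the while loop (proved sufficient below)
def pvFuel (D : Nat) : Nat := 200 * 100 ^ D

-- the while loop of Source B: pop one frame per step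
def goB : Nat → PySem.Dict (Int × Int) String → List PvFrame → PySem.Dict (Int × Int) String
  | 0, d, _ => d
  | f + 1, d, st =>
    match st with
    | [] => d
    | .eval cell :: st =>
      let v := d.getD cell ""
      if v ∈ pvStop then goB f d st
      else
        match PySem.Int.ofStr? v with
        | none => goB f d st
        | some hv0 =>
          let hp := (nbr cell).foldl (fun (acc : Int × Int) n =>
              let w := d.getD n ""
              if w = "*" then (acc.1 - 1, acc.2)
              else if w = "-" then (acc.1, acc.2 + 1) else acc) (hv0, 0)
          if hp.1 = 0 then goB f d (.mark "." cell (nbr cell) :: st)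
          else if hp.2 = hp.1 then goB f d (.mark "*" cell (nbr cell) :: st)
          else goB f d st
    | .mark m cell rest :: st =>
      match rest with
      | [] => goB f d st
      | i :: rest =>
        if d.getD i "" = "-" then
          goB f (d.insert i m) (.scan (if m = "." then cell else i) (nbr i) :: .mark m cell rest :: st)
        else goB f d (.mark m cell rest :: st)
    | .scan excl rest :: st =>
      match rest with
      | [] => goB f d st
      | j :: rest =>
        if ¬ (d.getD j "" ∈ pvStop) ∧ excl ≠ j then
          goB f d (.eval j :: .scan excl rest :: st)
        else goB f d (.scan excl rest :: st)

def identify100and0_alt (inp : List (Int × Int × String)) (item : Int × Int) : List (Int × Int × String) :=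
  let d := pvToDict inp
  pvToTriples (goB (pvFuel (pvDash d)) d [.eval item])

-- ===== PRECONDITION & SPEC =====

def pvOkv (v : String) : Bool := v ∈ pvStop || (PySem.Int.ofStr? v).isSome

-- Pre_ excludes the inputs on which A raises (item not a key, an unparseable cell value,
-- or a missing/ill-valued cell read during propagation): item must be a present, legal
-- key; if its value is a number all its neighbors must be present and legal; and if that
-- number forces a deduction (all mines found, or #'-' equals the remaining count) Pre_
-- conservatively demands the full well-valued 8x7 board, which also excludes some
-- incomplete boards on which A happens to return its input unchanged.
def Pre_identify100and0 (inp : List (Int × Int × String)) (item : Int × Int) : Prop :=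
  (pvToDict inp).contains item = true ∧
  pvOkv ((pvToDict inp).getD item "") = true ∧
  (¬ (pvToDict inp).getD item "" ∈ pvStop →
    (∀ j ∈ nbr item, (pvToDict inp).contains j = true ∧ pvOkv ((pvToDict inp).getD j "") = true) ∧
    (((PySem.Int.ofStr? ((pvToDict inp).getD item "")).getD 0
        - (((nbr item).filter (fun j => (pvToDict inp).getD j "" == "*")).length : Int) = 0 ∨
      ((((nbr item).filter (fun j => (pvToDict inp).getD j "" == "-")).length : Int)
        = (PySem.Int.ofStr? ((pvToDict inp).getD item "")).getD 0
          - (((nbr item).filter (fun j => (pvToDict inp).getD j "" == "*")).length : Int))) →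
      ∀ l ∈ List.range 8, ∀ c ∈ List.range 7,
        (pvToDict inp).contains ((l : Int), (c : Int)) = true ∧
        pvOkv ((pvToDict inp).getD ((l : Int), (c : Int)) "") = true))

instance (inp : List (Int × Int × String)) (item : Int × Int) : Decidable (Pre_identify100and0 inp item) := by
  unfold Pre_identify100and0; infer_instance

def pvWitness_identify100and0 : (List (Int × Int × String)) × (Int × Int) :=
  ([((100 : Int), (100 : Int), "5")], ((100 : Int), (100 : Int)))

def Spec_identify100and0 (inp : List (Int × Int × String)) (item : Int × Int) (out : List (Int × Int × String)) : Prop := out = identify100and0_alt inp item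
instance (inp : List (Int × Int × String)) (item : Int × Int) (out : List (Int × Int × String)) : Decidable (Spec_identify100and0 inp item out) := by unfold Spec_identify100and0; infer_instance

-- ===== CLAIM (what is proved, stated in full; the proofs are below) =====
def Claim_equal_identify100and0 : Prop := ∀ (inp : List (Int × Int × String)) (item : Int × Int), Dom_identify100and0 inp item → Pre_identify100and0 inp item → Spec_identify100and0 inp item (identify100and0 inp item)

-- ===== LEMMAS AND PROOFS =====

-- proof-side views of A's two propagation loops
def jstepA (f : Nat) (excl : Int × Int) (dd : PySem.Dict (Int × Int) String) (j : Int × Int) :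
    PySem.Dict (Int × Int) String :=
  if ¬ (dd.getD j "" ∈ pvStop) ∧ excl ≠ j then goA f dd j else dd

def scanFoldA (f : Nat) (excl : Int × Int) (rest : List (Int × Int))
    (d : PySem.Dict (Int × Int) String) : PySem.Dict (Int × Int) String :=
  rest.foldl (fun dd j => jstepA f excl dd j) d

def markFoldA (f : Nat) (m : String) (cell : Int × Int) (rest : List (Int × Int))
    (d : PySem.Dict (Int × Int) String) : PySem.Dict (Int × Int) String :=
  rest.foldl (fun dd i =>
    if dd.getD i "" = "-" then
      scanFoldA f (if m = "." then cell else i) (nbr i) (dd.insert i m)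
    else dd) d

-- step budget available to the frames spawned at '-'-count level D
def pvBm : Nat → Nat
  | 0 => 0
  | D + 1 => pvFuel D

lemma goB_nil (f : Nat) (d : PySem.Dict (Int × Int) String) : goB f d [] = d := by
  cases f <;> simp [goB]

lemma pvFuel_mono {a b : Nat} (h : a ≤ b) : pvFuel a ≤ pvFuel b := by
  unfold pvFuel
  exact Nat.mul_le_mul_left _ (Nat.pow_le_pow_right (by norm_num) h)

lemma pvFuel_le_pvBm {a D : Nat} (h : a < D) : pvFuel a ≤ pvBm D := by
  cases D with
  | zero => omega
  | succ D => exact pvFuel_mono (by omega)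

lemma pvFuel_ge (D : Nat) : 101 + 81 * pvBm D ≤ pvFuel D := by
  cases D with
  | zero => simp [pvBm, pvFuel]
  | succ D =>
    have h1 : 1 ≤ 100 ^ D := Nat.one_le_pow _ _ (by norm_num)
    simp only [pvBm, pvFuel, pow_succ]
    nlinarith

lemma pvFuel_pos (D : Nat) : 1 ≤ pvFuel D := by
  have := pvFuel_ge D; omega

lemma dash_map_le (i : Int × Int) (m : String) (hm : m ≠ "-") (l : List ((Int × Int) × String)) :
    (l.map (fun p => if p.1 == i then (i, m) else p)).countP (fun p => p.2 == "-")
      ≤ l.countP (fun p => p.2 == "-") := by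
  rw [List.countP_map]
  apply List.countP_mono_left
  intro p _ hp
  simp only [Function.comp] at hp
  by_cases h : p.1 == i
  · simp [h] at hp
    exact absurd (by simpa using hp) hm
  · simpa [h] using hp

lemma dash_insert_le (d : PySem.Dict (Int × Int) String) (i : Int × Int) (m : String)
    (hm : m ≠ "-") : pvDash (d.insert i m) ≤ pvDash d := by
  unfold pvDash
  by_cases hc : d.contains i
  · rw [PySem.Dict.items_insert_of_contains _ _ hc]
    exact dash_map_le i m hm d.items
  · rw [PySem.Dict.items_insert_of_not_contains _ _ (by simpa using hc)]
    simp [List.countP_append, hm]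

lemma getD_dash_get? (d : PySem.Dict (Int × Int) String) (i : Int × Int)
    (h : d.getD i "" = "-") : d.get? i = some "-" := by
  rw [PySem.Dict.getD_eq_get?_getD] at h
  cases hg : d.get? i with
  | none => rw [hg] at h; simp at h
  | some v =>
    rw [hg] at h
    simp only [Option.getD_some] at h
    rw [h]

lemma dash_aux (i : Int × Int) (m : String) (hm : m ≠ "-") :
    ∀ (l : List ((Int × Int) × String)),
      (PySem.Dict.mk l).get? i = some "-" →
      (l.map (fun p => if p.1 == i then (i, m) else p)).countP (fun p => p.2 == "-")
        < l.countP (fun p => p.2 == "-") := by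
  intro l
  induction l with
  | nil => intro h; simp [PySem.Dict.get?] at h
  | cons p t iht =>
    obtain ⟨pk, pv⟩ := p
    intro h
    rw [PySem.Dict.get?_mk_cons] at h
    by_cases hp : pk == i
    · rw [if_pos hp] at h
      have hpv : pv = "-" := by simpa using h
      simp only [List.map_cons, List.countP_cons]
      rw [if_pos hp]
      have e2 : (((i, m).2 : String) == "-") = false := by simpa using hm
      have e3 : (((pk, pv).2 : String) == "-") = true := by simpa using hpv
      rw [e2, e3]
      simp only [if_false, if_true, Bool.false_eq_true]
      have := dash_map_le i m hm t
      omega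
    · rw [if_neg (by simpa using hp)] at h
      have := iht h
      simp only [List.map_cons, List.countP_cons]
      rw [if_neg hp]
      dsimp only
      omega

lemma dash_insert_lt (d : PySem.Dict (Int × Int) String) (i : Int × Int) (m : String)
    (hm : m ≠ "-") (h : d.get? i = some "-") : pvDash (d.insert i m) < pvDash d := by
  have hc : d.contains i := by
    rw [PySem.Dict.contains_eq_isSome_get?, h]; rfl
  unfold pvDash
  rw [PySem.Dict.items_insert_of_contains _ _ hc]
  obtain ⟨l⟩ := d
  exact dash_aux i m hm l h

lemma foldl_dash_le {α : Type} (l : List α)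
    (g : PySem.Dict (Int × Int) String → α → PySem.Dict (Int × Int) String)
    (h : ∀ dd x, pvDash (g dd x) ≤ pvDash dd) :
    ∀ d, pvDash (l.foldl g d) ≤ pvDash d := by
  induction l with
  | nil => intro d; simp
  | cons x t iht =>
    intro d
    simp only [List.foldl_cons]
    exact le_trans (iht (g d x)) (h d x)

lemma goA_dash : ∀ (f : Nat) (d : PySem.Dict (Int × Int) String) (item : Int × Int),
    pvDash (goA f d item) ≤ pvDash d := by
  intro f
  induction f with
  | zero => intro d item; simp [goA]
  | succ f ihf =>
    intro d item
    rw [goA]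
    split
    · exact le_refl _
    split
    · exact le_refl _
    dsimp only
    split
    · apply foldl_dash_le
      intro dd i
      split
      · refine le_trans (foldl_dash_le _ _ ?_ _) (dash_insert_le _ _ _ (by decide))
        intro dd2 j
        split
        · exact ihf dd2 j
        · exact le_refl _
      · exact le_refl _
    split
    · apply foldl_dash_le
      intro dd i
      split
      · refine le_trans (foldl_dash_le _ _ ?_ _) (dash_insert_le _ _ _ (by decide))
        intro dd2 j
        split
        · exact ihf dd2 j
        · exact le_refl _
      · exact le_refl _
    · exact le_refl _

lemma scanFoldA_dash (f : Nat) (excl : Int × Int) (rest : List (Int × Int))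
    (d : PySem.Dict (Int × Int) String) : pvDash (scanFoldA f excl rest d) ≤ pvDash d := by
  apply foldl_dash_le
  intro dd j
  unfold jstepA
  split
  · exact goA_dash f dd j
  · exact le_refl _

lemma len_ite_app (c : Prop) [Decidable c] (l : List (Int × Int)) (t : Int × Int) (n : Nat)
    (h : l.length ≤ n) : (if c then l ++ [t] else l).length ≤ n + 1 := by
  split
  · simp; omega
  · omega

lemma nbr_len (x : Int × Int) : (nbr x).length ≤ 9 := by
  unfold nbr
  simp only [List.foldl_cons, List.foldl_nil]
  exact len_ite_app _ _ _ 8 (len_ite_app _ _ _ 7 (len_ite_app _ _ _ 6 (len_ite_app _ _ _ 5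
    (len_ite_app _ _ _ 4 (len_ite_app _ _ _ 3 (len_ite_app _ _ _ 2 (len_ite_app _ _ _ 1
    (len_ite_app _ _ _ 0 (by simp)))))))))

-- B's single-pass (house_value, #possibilities) loop computes A's pair up to length
lemma pv_pair (d : PySem.Dict (Int × Int) String) (l : List (Int × Int)) :
    ∀ (a : Int) (pl : List (Int × Int)),
    l.foldl (fun (acc : Int × Int) n =>
        let w := d.getD n ""
        if w = "*" then (acc.1 - 1, acc.2)
        else if w = "-" then (acc.1, acc.2 + 1) else acc) (a, (pl.length : Int))
      = ((l.foldl (fun (acc : Int × List (Int × Int)) i =>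
          if d.getD i "" = "*" then (acc.1 - 1, acc.2)
          else if d.getD i "" = "-" then (acc.1, acc.2 ++ [i]) else acc) (a, pl)).1,
         (((l.foldl (fun (acc : Int × List (Int × Int)) i =>
          if d.getD i "" = "*" then (acc.1 - 1, acc.2)
          else if d.getD i "" = "-" then (acc.1, acc.2 ++ [i]) else acc) (a, pl)).2.length : Int))) := by
  induction l with
  | nil => intro a pl; simp
  | cons n t iht =>
    intro a pl
    simp only [List.foldl_cons]
    by_cases h1 : d.getD n "" = "*"
    · simpa [h1] using iht (a - 1) pl
    · by_cases h2 : d.getD n "" = "-"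
      · have := iht a (pl ++ [n])
        simp only [List.length_append, List.length_cons, List.length_nil] at this
        push_cast at this
        simpa [h1, h2] using this
      · simpa [h1, h2] using iht a pl

-- single-step reductions of the goB machine
lemma stepB_mark_nil (f : Nat) (d : PySem.Dict (Int × Int) String) (m : String)
    (cell : Int × Int) (st : List PvFrame) :
    goB (f + 1) d (.mark m cell [] :: st) = goB f d st := by simp [goB]

lemma stepB_mark_cons_dash (f : Nat) (d : PySem.Dict (Int × Int) String) (m : String)
    (cell i : Int × Int) (rest : List (Int × Int)) (st : List PvFrame)
    (hi : d.getD i "" = "-") :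
    goB (f + 1) d (.mark m cell (i :: rest) :: st)
      = goB f (d.insert i m) (.scan (if m = "." then cell else i) (nbr i) :: .mark m cell rest :: st) := by
  simp [goB, hi]

lemma stepB_mark_cons_skip (f : Nat) (d : PySem.Dict (Int × Int) String) (m : String)
    (cell i : Int × Int) (rest : List (Int × Int)) (st : List PvFrame)
    (hi : ¬ d.getD i "" = "-") :
    goB (f + 1) d (.mark m cell (i :: rest) :: st) = goB f d (.mark m cell rest :: st) := by
  simp [goB, hi]

lemma stepB_scan_nil (f : Nat) (d : PySem.Dict (Int × Int) String) (excl : Int × Int)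
    (st : List PvFrame) : goB (f + 1) d (.scan excl [] :: st) = goB f d st := by simp [goB]

lemma stepB_scan_cons_hit (f : Nat) (d : PySem.Dict (Int × Int) String) (excl j : Int × Int)
    (rest : List (Int × Int)) (st : List PvFrame)
    (hg : ¬ (d.getD j "" ∈ pvStop) ∧ excl ≠ j) :
    goB (f + 1) d (.scan excl (j :: rest) :: st)
      = goB f d (.eval j :: .scan excl rest :: st) := by
  simp [goB, hg]

lemma stepB_scan_cons_skip (f : Nat) (d : PySem.Dict (Int × Int) String) (excl j : Int × Int)
    (rest : List (Int × Int)) (st : List PvFrame)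
    (hg : ¬ (¬ (d.getD j "" ∈ pvStop) ∧ excl ≠ j)) :
    goB (f + 1) d (.scan excl (j :: rest) :: st) = goB f d (.scan excl rest :: st) := by
  simp only [goB]
  rw [if_neg hg]

lemma stepB_eval_stop (f : Nat) (d : PySem.Dict (Int × Int) String) (cell : Int × Int)
    (st : List PvFrame) (hv : d.getD cell "" ∈ pvStop) :
    goB (f + 1) d (.eval cell :: st) = goB f d st := by
  simp [goB, hv]

lemma stepB_eval_fail (f : Nat) (d : PySem.Dict (Int × Int) String) (cell : Int × Int)
    (st : List PvFrame) (hv : ¬ d.getD cell "" ∈ pvStop)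
    (hp : PySem.Int.ofStr? (d.getD cell "") = none) :
    goB (f + 1) d (.eval cell :: st) = goB f d st := by
  simp [goB, hv, hp]

lemma stepB_eval_branch (f : Nat) (d : PySem.Dict (Int × Int) String) (cell : Int × Int)
    (st : List PvFrame) (hv : ¬ d.getD cell "" ∈ pvStop) (hv0 : Int)
    (hp : PySem.Int.ofStr? (d.getD cell "") = some hv0) :
    goB (f + 1) d (.eval cell :: st)
      = (if ((nbr cell).foldl (fun (acc : Int × List (Int × Int)) i =>
          if d.getD i "" = "*" then (acc.1 - 1, acc.2)
          else if d.getD i "" = "-" then (acc.1, acc.2 ++ [i]) else acc) (hv0, [])).1 = 0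
         then goB f d (.mark "." cell (nbr cell) :: st)
         else if (((((nbr cell).foldl (fun (acc : Int × List (Int × Int)) i =>
          if d.getD i "" = "*" then (acc.1 - 1, acc.2)
          else if d.getD i "" = "-" then (acc.1, acc.2 ++ [i]) else acc) (hv0, [])).2.length) : Int)
             = ((nbr cell).foldl (fun (acc : Int × List (Int × Int)) i =>
          if d.getD i "" = "*" then (acc.1 - 1, acc.2)
          else if d.getD i "" = "-" then (acc.1, acc.2 ++ [i]) else acc) (hv0, [])).1)
         then goB f d (.mark "*" cell (nbr cell) :: st)
         else goB f d st) := by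
  have hpair := pv_pair d (nbr cell) hv0 []
  simp only [List.length_nil, Nat.cast_zero] at hpair
  simp only [goB, hv, hp]
  rw [hpair]
  simp

-- A's branch loops are markFoldA with the matching mark and exclusion cell
lemma goA_succ_stop (f : Nat) (d : PySem.Dict (Int × Int) String) (item : Int × Int)
    (hv : d.getD item "" ∈ pvStop) : goA (f + 1) d item = d := by
  simp [goA, hv]

lemma goA_succ_fail (f : Nat) (d : PySem.Dict (Int × Int) String) (item : Int × Int)
    (hv : ¬ d.getD item "" ∈ pvStop) (hp : PySem.Int.ofStr? (d.getD item "") = none) :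
    goA (f + 1) d item = d := by
  simp [goA, hv, hp]

lemma goA_succ_branch (f : Nat) (d : PySem.Dict (Int × Int) String) (item : Int × Int)
    (hv : ¬ d.getD item "" ∈ pvStop) (hv0 : Int)
    (hp : PySem.Int.ofStr? (d.getD item "") = some hv0) :
    goA (f + 1) d item
      = (if ((nbr item).foldl (fun (acc : Int × List (Int × Int)) i =>
          if d.getD i "" = "*" then (acc.1 - 1, acc.2)
          else if d.getD i "" = "-" then (acc.1, acc.2 ++ [i]) else acc) (hv0, [])).1 = 0
         then markFoldA f "." item (nbr item) d
         else if (((((nbr item).foldl (fun (acc : Int × List (Int × Int)) i =>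
          if d.getD i "" = "*" then (acc.1 - 1, acc.2)
          else if d.getD i "" = "-" then (acc.1, acc.2 ++ [i]) else acc) (hv0, [])).2.length) : Int)
             = ((nbr item).foldl (fun (acc : Int × List (Int × Int)) i =>
          if d.getD i "" = "*" then (acc.1 - 1, acc.2)
          else if d.getD i "" = "-" then (acc.1, acc.2 ++ [i]) else acc) (hv0, [])).1)
         then markFoldA f "*" item (nbr item) d
         else d) := by
  simp only [goA, hv, hp, markFoldA, scanFoldA, jstepA]
  simp

theorem pv_master : ∀ (D fA : Nat) (d : PySem.Dict (Int × Int) String) (item : Int × Int) (st : List PvFrame),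
    pvDash d ≤ D → D < fA →
    ∃ k, k ≤ pvFuel D ∧ ∀ fB, goB (fB + k) d (.eval item :: st) = goB fB (goA fA d item) st := by
  intro D
  induction D using Nat.strong_induction_on with
  | _ D IH =>
  intro fA d item st hdash hfa
  obtain ⟨f, rfl⟩ : ∃ f, fA = f + 1 := ⟨fA - 1, by omega⟩
  have hDf : D ≤ f := by omega
  -- the scan loop of B consumes A's inner (j) loop
  have hscan : ∀ (excl : Int × Int) (rest : List (Int × Int)), rest.length ≤ 9 →
      ∀ (d : PySem.Dict (Int × Int) String) (st : List PvFrame), pvDash d < D →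
      ∃ k, k ≤ 1 + rest.length * (1 + pvBm D) ∧
        ∀ fB, goB (fB + k) d (.scan excl rest :: st) = goB fB (scanFoldA f excl rest d) st := by
    intro excl rest
    induction rest with
    | nil =>
      intro _ d st _
      exact ⟨1, by omega, fun fB => by rw [stepB_scan_nil]; simp [scanFoldA]⟩
    | cons j rest IHr =>
      intro hlen d st hd
      have hlen' : rest.length ≤ 9 := by simp at hlen; omega
      by_cases hg : ¬ (d.getD j "" ∈ pvStop) ∧ excl ≠ j
      · obtain ⟨k1, hk1, h1⟩ := IH (pvDash d) (by omega) f d j (.scan excl rest :: st) (le_refl _) (by omega)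
        have hd' : pvDash (goA f d j) < D := lt_of_le_of_lt (goA_dash f d j) hd
        obtain ⟨k2, hk2, h2⟩ := IHr hlen' (goA f d j) st hd'
        have hk1' : k1 ≤ pvBm D := le_trans hk1 (pvFuel_le_pvBm hd)
        refine ⟨1 + k1 + k2, ?_, fun fB => ?_⟩
        · have hexp : (rest.length + 1) * (1 + pvBm D) = rest.length * (1 + pvBm D) + (1 + pvBm D) := by ring
          simp only [List.length_cons]
          omega
        · have e : fB + (1 + k1 + k2) = ((fB + k2) + k1) + 1 := by omega
          rw [e, stepB_scan_cons_hit _ _ _ _ _ _ hg, h1 (fB + k2), h2 fB]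
          simp [scanFoldA, jstepA, hg]
      · obtain ⟨k2, hk2, h2⟩ := IHr hlen' d st hd
        refine ⟨1 + k2, ?_, fun fB => ?_⟩
        · have hexp : (rest.length + 1) * (1 + pvBm D) = rest.length * (1 + pvBm D) + (1 + pvBm D) := by ring
          simp only [List.length_cons]
          omega
        · have e : fB + (1 + k2) = (fB + k2) + 1 := by omega
          rw [e, stepB_scan_cons_skip _ _ _ _ _ _ hg, h2 fB]
          simp only [scanFoldA, List.foldl_cons, jstepA]
          rw [if_neg hg]
  -- the mark loop of B consumes A's outer (i) loop
  have hmark : ∀ (m : String), m ≠ "-" → ∀ (cell : Int × Int) (rest : List (Int × Int)), rest.length ≤ 9 →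
      ∀ (d : PySem.Dict (Int × Int) String) (st : List PvFrame), pvDash d ≤ D →
      ∃ k, k ≤ 1 + rest.length * (11 + 9 * pvBm D) ∧
        ∀ fB, goB (fB + k) d (.mark m cell rest :: st) = goB fB (markFoldA f m cell rest d) st := by
    intro m hm cell rest
    induction rest with
    | nil =>
      intro _ d st _
      exact ⟨1, by omega, fun fB => by rw [stepB_mark_nil]; simp [markFoldA]⟩
    | cons i rest IHr =>
      intro hlen d st hd
      have hlen' : rest.length ≤ 9 := by simp at hlen; omega
      by_cases hi : d.getD i "" = "-"
      · have hget : d.get? i = some "-" := getD_dash_get? d i hi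
        have hlt : pvDash (d.insert i m) < pvDash d := dash_insert_lt d i m hm hget
        obtain ⟨k1, hk1, h1⟩ := hscan (if m = "." then cell else i) (nbr i) (nbr_len i)
          (d.insert i m) (.mark m cell rest :: st) (by omega)
        have hd2 : pvDash (scanFoldA f (if m = "." then cell else i) (nbr i) (d.insert i m)) ≤ D :=
          le_trans (scanFoldA_dash _ _ _ _) (by omega)
        obtain ⟨k2, hk2, h2⟩ := IHr hlen' _ st hd2
        refine ⟨1 + k1 + k2, ?_, fun fB => ?_⟩
        · have hexp : (rest.length + 1) * (11 + 9 * pvBm D) = rest.length * (11 + 9 * pvBm D) + (11 + 9 * pvBm D) := by ring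
          have hk1'' : k1 ≤ 10 + 9 * pvBm D := by
            have h9 : (nbr i).length * (1 + pvBm D) ≤ 9 * (1 + pvBm D) :=
              Nat.mul_le_mul_right _ (nbr_len i)
            omega
          simp only [List.length_cons]
          omega
        · have e : fB + (1 + k1 + k2) = ((fB + k2) + k1) + 1 := by omega
          rw [e, stepB_mark_cons_dash _ _ _ _ _ _ _ hi, h1 (fB + k2), h2 fB]
          simp only [markFoldA, List.foldl_cons]
          rw [if_pos hi]
      · obtain ⟨k2, hk2, h2⟩ := IHr hlen' d st hd
        refine ⟨1 + k2, ?_, fun fB => ?_⟩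
        · have hexp : (rest.length + 1) * (11 + 9 * pvBm D) = rest.length * (11 + 9 * pvBm D) + (11 + 9 * pvBm D) := by ring
          simp only [List.length_cons]
          omega
        · have e : fB + (1 + k2) = (fB + k2) + 1 := by omega
          rw [e, stepB_mark_cons_skip _ _ _ _ _ _ _ hi, h2 fB]
          simp only [markFoldA, List.foldl_cons]
          rw [if_neg hi]
  -- the eval frame consumes one call of A
  by_cases hv : d.getD item "" ∈ pvStop
  · refine ⟨1, pvFuel_pos D, fun fB => ?_⟩
    rw [stepB_eval_stop _ _ _ _ hv, goA_succ_stop _ _ _ hv]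
  · cases hp : PySem.Int.ofStr? (d.getD item "") with
    | none =>
      refine ⟨1, pvFuel_pos D, fun fB => ?_⟩
      rw [stepB_eval_fail _ _ _ _ hv hp, goA_succ_fail _ _ _ hv hp]
    | some hv0 =>
      set hpA := (nbr item).foldl (fun (acc : Int × List (Int × Int)) i =>
          if d.getD i "" = "*" then (acc.1 - 1, acc.2)
          else if d.getD i "" = "-" then (acc.1, acc.2 ++ [i]) else acc) (hv0, []) with hpA_def
      by_cases h0 : hpA.1 = 0
      · obtain ⟨km, hkm, hM⟩ := hmark "." (by decide) item (nbr item) (nbr_len item) d st hdash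
        refine ⟨1 + km, ?_, fun fB => ?_⟩
        · have h9 : (nbr item).length * (11 + 9 * pvBm D) ≤ 9 * (11 + 9 * pvBm D) :=
            Nat.mul_le_mul_right _ (nbr_len item)
          have := pvFuel_ge D
          omega
        · have e : fB + (1 + km) = (fB + km) + 1 := by omega
          rw [e, stepB_eval_branch _ _ _ _ hv hv0 hp, goA_succ_branch _ _ _ hv hv0 hp]
          rw [← hpA_def, if_pos h0, if_pos h0, hM fB]
      · by_cases hL : ((hpA.2.length : Int)) = hpA.1
        · obtain ⟨km, hkm, hM⟩ := hmark "*" (by decide) item (nbr item) (nbr_len item) d st hdash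
          refine ⟨1 + km, ?_, fun fB => ?_⟩
          · have h9 : (nbr item).length * (11 + 9 * pvBm D) ≤ 9 * (11 + 9 * pvBm D) :=
              Nat.mul_le_mul_right _ (nbr_len item)
            have := pvFuel_ge D
            omega
          · have e : fB + (1 + km) = (fB + km) + 1 := by omega
            rw [e, stepB_eval_branch _ _ _ _ hv hv0 hp, goA_succ_branch _ _ _ hv hv0 hp]
            rw [← hpA_def, if_neg h0, if_neg h0, if_pos hL, if_pos hL, hM fB]
        · refine ⟨1, pvFuel_pos D, fun fB => ?_⟩
          rw [stepB_eval_branch _ _ _ _ hv hv0 hp, goA_succ_branch _ _ _ hv hv0 hp]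
          rw [← hpA_def, if_neg h0, if_neg h0, if_neg hL, if_neg hL]

theorem pv_equal (inp : List (Int × Int × String)) (item : Int × Int) :
    identify100and0 inp item = identify100and0_alt inp item := by
  unfold identify100and0 identify100and0_alt
  dsimp only
  obtain ⟨k, hk, h⟩ := pv_master (pvDash (pvToDict inp)) (pvDash (pvToDict inp) + 1)
    (pvToDict inp) item [] (le_refl _) (by omega)
  have e := h (pvFuel (pvDash (pvToDict inp)) - k)
  rw [Nat.sub_add_cancel hk, goB_nil] at e
  rw [← e]



-- ===== VERDICT (by name: the statement is the Claim_ definition above) =====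
theorem identify100and0_spec : Claim_equal_identify100and0 := by
  intro inp item _ _
  unfold Spec_identify100and0
  exact pv_equal inp item
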